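-- pv_equiv track=rewrite | github.com/Sggggt/RL-Gomoku | alphazero/selfplay.py | _all_lines
-- ===== SOURCE A (Python) =====
-- def _collect_line(r0: int, c0: int, dr: int, dc: int, n: int) -> list[tuple[int, int]]:
--     out: list[tuple[int, int]] = []
--     r, c = r0, c0
--     while 0 <= r < n and 0 <= c < n:
--         out.append((r, c))
--         r += dr
--         c += dc
--     return out
--
-- def _all_lines(n: int) -> list[list[tuple[int, int]]]:
--     lines: list[list[tuple[int, int]]] = []
--     for r in range(n):
--         lines.append([(r, c) for c in range(n)])
--     for c in range(n):
--         lines.append([(r, c) for r in range(n)])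
--     for c0 in range(n):
--         lines.append(_collect_line(0, c0, 1, 1, n))
--     for r0 in range(1, n):
--         lines.append(_collect_line(r0, 0, 1, 1, n))
--     for c0 in range(n):
--         lines.append(_collect_line(0, c0, 1, -1, n))
--     for r0 in range(1, n):
--         lines.append(_collect_line(r0, n - 1, 1, -1, n))
--     return [line for line in lines if len(line) >= 5]
-- ===== SOURCE B (Python) =====
-- def _all_lines(n: int) -> list[list[tuple[int, int]]]:
--     rows: dict = {}
--     cols: dict = {}
--     diag: dict = {}
--     anti: dict = {}
--     for r in range(n):
--         for c in range(n):
--             cell = (r, c)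
--             rows.setdefault(r, []).append(cell)
--             cols.setdefault(c, []).append(cell)
--             diag.setdefault(r - c, []).append(cell)
--             anti.setdefault(r + c, []).append(cell)
--     lines: list = []
--     for r in range(n):
--         lines.append(rows.get(r, []))
--     for c in range(n):
--         lines.append(cols.get(c, []))
--     for c0 in range(n):
--         lines.append(diag.get(-c0, []))
--     for r0 in range(1, n):
--         lines.append(diag.get(r0, []))
--     for k in range(2 * n - 1):
--         lines.append(anti.get(k, []))
--     return [line for line in lines if len(line) >= 5]
-- ===== Notes on version B (the rewrite author's own statement) =====
-- stated objective: alternative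
-- what changed: Instead of six dedicated enumeration loops with a boundary-walking while-loop helper for each diagonal, B makes one pass over all cells bucketing each (r,c) into four dicts keyed by r, c, r-c and r+c, then emits the buckets in A's original line order and filters length >= 5.
import Mathlib
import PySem

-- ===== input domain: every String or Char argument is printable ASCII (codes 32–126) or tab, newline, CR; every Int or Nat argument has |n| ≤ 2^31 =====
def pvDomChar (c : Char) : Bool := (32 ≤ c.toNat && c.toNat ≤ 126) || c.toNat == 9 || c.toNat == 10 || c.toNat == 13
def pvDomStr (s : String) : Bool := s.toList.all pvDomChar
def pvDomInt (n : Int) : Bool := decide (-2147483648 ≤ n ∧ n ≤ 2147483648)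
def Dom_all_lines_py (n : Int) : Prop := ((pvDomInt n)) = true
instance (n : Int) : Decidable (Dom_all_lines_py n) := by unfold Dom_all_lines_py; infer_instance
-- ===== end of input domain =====

-- B replaces A's six dedicated enumeration loops (with a boundary-walking while-loop
-- helper for the diagonals) by ONE pass over all cells that buckets each cell into
-- dicts keyed by r, c, r-c and r+c, then reads the buckets back in A's order (objective: alternative).

-- ===== PORT A =====
-- the while loop of _collect_line; fuel only makes the loop total (n.toNat steps always suffice at A's call sites)
def collectGo (n dr dc : Int) : Nat → Int → Int → List (Int × Int)
  | 0, _, _ => []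
  | fuel + 1, r, c =>
    if 0 ≤ r ∧ r < n ∧ 0 ≤ c ∧ c < n then
      (r, c) :: collectGo n dr dc fuel (r + dr) (c + dc)
    else []

def collectLine (r0 c0 dr dc n : Int) : List (Int × Int) :=
  collectGo n dr dc n.toNat r0 c0

def all_lines_py (n : Int) : List (List (Int × Int)) :=
  ((PySem.List.pyRange 0 n 1).map (fun r => (PySem.List.pyRange 0 n 1).map (fun c => (r, c)))
    ++ (PySem.List.pyRange 0 n 1).map (fun c => (PySem.List.pyRange 0 n 1).map (fun r => (r, c)))
    ++ (PySem.List.pyRange 0 n 1).map (fun c0 => collectLine 0 c0 1 1 n)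
    ++ (PySem.List.pyRange 1 n 1).map (fun r0 => collectLine r0 0 1 1 n)
    ++ (PySem.List.pyRange 0 n 1).map (fun c0 => collectLine 0 c0 1 (-1) n)
    ++ (PySem.List.pyRange 1 n 1).map (fun r0 => collectLine r0 (n - 1) 1 (-1) n)
  ).filter (fun line => decide (5 ≤ line.length))

-- ===== PORT B =====
-- state of the bucketing pass: the four dicts (rows, cols, diag, anti)
def BSt : Type :=
  PySem.Dict Int (List (Int × Int)) × PySem.Dict Int (List (Int × Int))
    × PySem.Dict Int (List (Int × Int)) × PySem.Dict Int (List (Int × Int))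

-- the nested 'for r: for c:' loop; 'setdefault(k, []).append(cell)' is 'modify k [] (· ++ [cell])'
def buildB (n : Int) : BSt :=
  (PySem.List.pyRange 0 n 1).foldl (fun st r =>
    (PySem.List.pyRange 0 n 1).foldl (fun (st : BSt) c =>
      (st.1.modify r [] (· ++ [(r, c)]),
       st.2.1.modify c [] (· ++ [(r, c)]),
       st.2.2.1.modify (r - c) [] (· ++ [(r, c)]),
       st.2.2.2.modify (r + c) [] (· ++ [(r, c)]))) st)
    (PySem.Dict.empty, PySem.Dict.empty, PySem.Dict.empty, PySem.Dict.empty)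

def all_lines_py_alt (n : Int) : List (List (Int × Int)) :=
  let st := buildB n
  ((PySem.List.pyRange 0 n 1).map (fun r => st.1.getD r [])
    ++ (PySem.List.pyRange 0 n 1).map (fun c => st.2.1.getD c [])
    ++ (PySem.List.pyRange 0 n 1).map (fun c0 => st.2.2.1.getD (-c0) [])
    ++ (PySem.List.pyRange 1 n 1).map (fun r0 => st.2.2.1.getD r0 [])
    ++ (PySem.List.pyRange 0 (2 * n - 1) 1).map (fun k => st.2.2.2.getD k [])
  ).filter (fun line => decide (5 ≤ line.length))

-- ===== PRECONDITION & SPEC =====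
def Spec_all_lines_py (n : Int) (out : List (List (Int × Int))) : Prop := out = all_lines_py_alt n
instance (n : Int) (out : List (List (Int × Int))) : Decidable (Spec_all_lines_py n out) := by unfold Spec_all_lines_py; infer_instance

-- ===== CLAIM =====
def Claim_equal_all_lines_py : Prop := ∀ (n : Int), Dom_all_lines_py n → Spec_all_lines_py n (all_lines_py n)

-- ===== LEMMAS AND PROOFS =====

theorem pv_foldl_flatMap {α β σ : Type} (l : List α) (h : α → List β) (g : σ → β → σ) (i : σ) :
    (l.flatMap h).foldl g i = l.foldl (fun s a => (h a).foldl g s) i := by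
  induction l generalizing i with
  | nil => rfl
  | cons a l ih => simp [List.flatMap_cons, List.foldl_append, ih]

theorem pv_filter_flatMap {α β : Type} (l : List α) (h : α → List β) (p : β → Bool) :
    (l.flatMap h).filter p = l.flatMap (fun a => (h a).filter p) := by
  induction l with
  | nil => rfl
  | cons a l ih => simp [List.flatMap_cons, List.filter_append, ih]

theorem pv_foldl_prod4 {α D1 D2 D3 D4 : Type}
    (f1 : D1 → α → D1) (f2 : D2 → α → D2) (f3 : D3 → α → D3) (f4 : D4 → α → D4) :
    ∀ (xs : List α) (d1 : D1) (d2 : D2) (d3 : D3) (d4 : D4),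
    xs.foldl (fun (st : D1 × D2 × D3 × D4) x =>
      (f1 st.1 x, f2 st.2.1 x, f3 st.2.2.1 x, f4 st.2.2.2 x)) (d1, d2, d3, d4)
      = (xs.foldl f1 d1, xs.foldl f2 d2, xs.foldl f3 d3, xs.foldl f4 d4) := by
  intro xs
  induction xs with
  | nil => intro d1 d2 d3 d4; rfl
  | cons a l ih => intro d1 d2 d3 d4; simp [List.foldl_cons, ih]

-- generic bucketing fold (proof-side view of B's pass, one key function at a time)
def bucketsFold (κ : Int × Int → Int) (xs : List (Int × Int)) : PySem.Dict Int (List (Int × Int)) :=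
  xs.foldl (fun d x => d.modify (κ x) [] (· ++ [x])) PySem.Dict.empty

theorem getD_bucketsFold (κ : Int × Int → Int) (xs : List (Int × Int)) (k : Int) :
    (bucketsFold κ xs).getD k [] = xs.filter (fun x => κ x == k) := by
  unfold bucketsFold
  have h : xs.foldl (fun d x => d.modify (κ x) [] (· ++ [x])) PySem.Dict.empty
      = (xs.map (fun x => (κ x, x))).foldl (fun d p => d.modify p.1 [] (· ++ [p.2])) PySem.Dict.empty := by
    rw [List.foldl_map]
  rw [h, PySem.Dict.getD_foldl_modify_append, PySem.Dict.getD_empty, List.filter_map, List.map_map]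
  simp [Function.comp_def]

-- all cells in row-major order, Nat-indexed
def cellsN (N : Nat) : List (Int × Int) :=
  (List.range N).flatMap (fun (i : Nat) => (List.range N).map (fun (j : Nat) => ((i : Int), (j : Int))))

theorem cells_eq (n : Int) :
    (PySem.List.pyRange 0 n 1).flatMap (fun r => (PySem.List.pyRange 0 n 1).map (fun c => (r, c)))
      = cellsN n.toNat := by
  unfold cellsN
  rw [PySem.List.pyRange_one]
  simp only [Int.sub_zero, zero_add]
  rw [List.flatMap_map]
  refine congrArg (fun F => List.flatMap F (List.range n.toNat)) ?_
  funext i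
  simp [Function.comp_def]

theorem buildB_eq (n : Int) :
    buildB n = (bucketsFold (·.1) (cellsN n.toNat), bucketsFold (·.2) (cellsN n.toNat),
      bucketsFold (fun x => x.1 - x.2) (cellsN n.toNat),
      bucketsFold (fun x => x.1 + x.2) (cellsN n.toNat)) := by
  unfold buildB bucketsFold
  have h4 := pv_foldl_prod4
    (fun (d : PySem.Dict Int (List (Int × Int))) (x : Int × Int) => d.modify x.1 [] (· ++ [x]))
    (fun (d : PySem.Dict Int (List (Int × Int))) (x : Int × Int) => d.modify x.2 [] (· ++ [x]))
    (fun (d : PySem.Dict Int (List (Int × Int))) (x : Int × Int) => d.modify (x.1 - x.2) [] (· ++ [x]))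
    (fun (d : PySem.Dict Int (List (Int × Int))) (x : Int × Int) => d.modify (x.1 + x.2) [] (· ++ [x]))
    (cellsN n.toNat) PySem.Dict.empty PySem.Dict.empty PySem.Dict.empty PySem.Dict.empty
  rw [← h4, ← cells_eq n, pv_foldl_flatMap]
  simp only [List.foldl_map]
  rfl

-- window lemma: a flatMap over range N whose rows are empty outside [lo, hi)
theorem flatMap_range_window {α : Type} (N : Nat) (lo hi : Int) (g G : Nat → List α)
    (hlo : 0 ≤ lo)
    (hg : ∀ i : Nat, i < N → g i = if lo ≤ (i : Int) ∧ (i : Int) < hi then G i else []) :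
    (List.range N).flatMap g
      = ((List.range ((min hi (N : Int)) - lo).toNat).map (fun j => G (lo.toNat + j))).flatten := by
  induction N with
  | zero =>
    have h0 : ((min hi (0 : Int)) - lo).toNat = 0 := by omega
    simp [h0]
  | succ N ih =>
    have hcast : (((N + 1 : Nat)) : Int) = (N : Int) + 1 := by push_cast; ring
    rw [List.range_succ, List.flatMap_append, ih (fun i hi' => hg i (Nat.lt_succ_of_lt hi')),
      List.flatMap_cons, List.flatMap_nil, hg N (Nat.lt_succ_self N), hcast]
    by_cases hc : lo ≤ (N : Int) ∧ (N : Int) < hi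
    · have h1 : (min hi ((N : Int) + 1) - lo).toNat = (min hi (N : Int) - lo).toNat + 1 := by omega
      have h2 : lo.toNat + (min hi (N : Int) - lo).toNat = N := by omega
      rw [if_pos hc, h1, List.range_succ, List.map_append, List.flatten_append]
      simp [h2]
    · have h1 : (min hi ((N : Int) + 1) - lo).toNat = (min hi (N : Int) - lo).toNat := by omega
      rw [if_neg hc, h1]
      simp

-- flatten of singleton rows is a map
theorem pv_flatten_map_singleton {α β : Type} (l : List α) (f : α → β) :
    (l.map (fun x => [f x])).flatten = l.map f := by
  induction l with
  | nil => rfl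
  | cons a l ih => simp [ih]

-- the singleton filter on a range: at most one j satisfies (j : Int) = v
theorem filter_range_int (N : Nat) (v : Int) :
    (List.range N).filter (fun (j : Nat) => decide ((j : Int) = v))
      = if 0 ≤ v ∧ v < (N : Int) then [v.toNat] else [] := by
  induction N with
  | zero =>
    rw [List.range_zero, List.filter_nil, if_neg (by omega)]
  | succ N ih =>
    rw [List.range_succ, List.filter_append, ih]
    by_cases h : (N : Int) = v
    · subst h
      rw [if_neg (by omega), if_pos (by constructor <;> omega)]
      simp
    · by_cases h2 : 0 ≤ v ∧ v < (N : Int)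
      · rw [if_pos h2, if_pos (by omega)]
        simp only [List.filter_cons, List.filter_nil]
        rw [decide_eq_false h]
        simp
      · rw [if_neg h2, if_neg (by omega)]
        simp only [List.filter_cons, List.filter_nil]
        rw [decide_eq_false h]
        simp

-- closed form of one bucket: key k selects column v i in row i, rows lo ≤ i < hi
theorem getD_bucket_closed (N : Nat) (κ : Int × Int → Int) (k lo hi : Int) (v : Int → Int)
    (hlo : 0 ≤ lo)
    (hκ : ∀ i j : Int, κ (i, j) = k ↔ j = v i)
    (hwin : ∀ i : Nat, i < N → ((0 ≤ v (i : Int) ∧ v (i : Int) < (N : Int)) ↔ (lo ≤ (i : Int) ∧ (i : Int) < hi))) :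
    (bucketsFold κ (cellsN N)).getD k []
      = (List.range ((min hi (N : Int)) - lo).toNat).map
          (fun j => (((lo.toNat + j : Nat) : Int), v ((lo.toNat + j : Nat) : Int))) := by
  rw [getD_bucketsFold]
  unfold cellsN
  rw [pv_filter_flatMap]
  have hg : ∀ i : Nat, i < N →
      ((List.range N).map (fun (j : Nat) => ((i : Int), (j : Int)))).filter (fun x => κ x == k)
        = if lo ≤ (i : Int) ∧ (i : Int) < hi then [((i : Int), v (i : Int))] else [] := by
    intro i hiN
    rw [List.filter_map]
    have hpred : ∀ j ∈ List.range N,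
        ((fun x => κ x == k) ∘ (fun (j : Nat) => ((i : Int), (j : Int)))) j
          = (fun (j : Nat) => decide ((j : Int) = v (i : Int))) j := by
      intro j _
      by_cases hj : ((j : Int)) = v ((i : Int))
      · have h1 : κ ((i : Int), (j : Int)) = k := (hκ _ _).mpr hj
        show (κ ((i : Int), (j : Int)) == k) = decide (((j : Int)) = v ((i : Int)))
        rw [decide_eq_true hj]
        simp [h1]
      · have hne : ¬ (κ ((i : Int), (j : Int)) = k) := fun hh => hj ((hκ _ _).mp hh)
        simp [Function.comp_def, hj, hne]
    rw [List.filter_congr hpred, filter_range_int]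
    by_cases hcnd : lo ≤ (i : Int) ∧ (i : Int) < hi
    · rw [if_pos ((hwin i hiN).mpr hcnd), if_pos hcnd]
      simp [Int.toNat_of_nonneg ((hwin i hiN).mpr hcnd).1]
    · rw [if_neg (fun hh => hcnd ((hwin i hiN).mp hh)), if_neg hcnd]
      simp
  rw [flatMap_range_window N lo hi _ (fun i => [((i : Int), v (i : Int))]) hlo hg,
    pv_flatten_map_singleton]

-- A-side closed forms of the while-loop walks
theorem collectGo_diag (n : Int) : ∀ (fuel : Nat) (r c : Int), 0 ≤ r → 0 ≤ c →
    (min (n - r) (n - c)).toNat ≤ fuel →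
    collectGo n 1 1 fuel r c =
      (List.range (min (n - r) (n - c)).toNat).map (fun (i : Nat) => (r + (i : Int), c + (i : Int))) := by
  intro fuel
  induction fuel with
  | zero =>
    intro r c hr hc hle
    have h0 : (min (n - r) (n - c)).toNat = 0 := Nat.le_zero.mp hle
    simp [collectGo, h0]
  | succ fuel ih =>
    intro r c hr hc hle
    by_cases hcond : 0 ≤ r ∧ r < n ∧ 0 ≤ c ∧ c < n
    · have hstep : (min (n - r) (n - c)).toNat = (min (n - (r + 1)) (n - (c + 1))).toNat + 1 := by
        omega
      have hle' : (min (n - (r + 1)) (n - (c + 1))).toNat ≤ fuel := by omega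
      rw [collectGo, if_pos hcond, ih (r + 1) (c + 1) (by omega) (by omega) hle', hstep,
        List.range_succ_eq_map, List.map_cons, List.map_map]
      refine congrArg₂ List.cons (by simp) (List.map_congr_left fun i _ => ?_)
      simp only [Function.comp_apply, Prod.mk.injEq]
      push_cast
      omega
    · have h0 : (min (n - r) (n - c)).toNat = 0 := by omega
      rw [collectGo, if_neg hcond, h0]
      simp

theorem collectGo_anti (n : Int) : ∀ (fuel : Nat) (r c : Int), 0 ≤ r → c < n →
    (min (n - r) (c + 1)).toNat ≤ fuel →
    collectGo n 1 (-1) fuel r c =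
      (List.range (min (n - r) (c + 1)).toNat).map (fun (i : Nat) => (r + (i : Int), c - (i : Int))) := by
  intro fuel
  induction fuel with
  | zero =>
    intro r c hr hc hle
    have h0 : (min (n - r) (c + 1)).toNat = 0 := Nat.le_zero.mp hle
    simp [collectGo, h0]
  | succ fuel ih =>
    intro r c hr hc hle
    by_cases hcond : 0 ≤ r ∧ r < n ∧ 0 ≤ c ∧ c < n
    · have hstep : (min (n - r) (c + 1)).toNat = (min (n - (r + 1)) ((c - 1) + 1)).toNat + 1 := by
        omega
      have hle' : (min (n - (r + 1)) ((c - 1) + 1)).toNat ≤ fuel := by omega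
      have hm : c + -1 = c - 1 := by ring
      rw [collectGo, if_pos hcond, hm, ih (r + 1) (c - 1) (by omega) (by omega) hle', hstep,
        List.range_succ_eq_map, List.map_cons, List.map_map]
      refine congrArg₂ List.cons (by simp) (List.map_congr_left fun i _ => ?_)
      simp only [Function.comp_apply, Prod.mk.injEq]
      push_cast
      omega
    · have h0 : (min (n - r) (c + 1)).toNat = 0 := by omega
      rw [collectGo, if_neg hcond, h0]
      simp

-- the four buckets, read at an in-range key, are A's four kinds of lines
theorem seg_row (n r : Int) (hr : 0 ≤ r) (hrn : r < n) :
    (bucketsFold (fun x => x.1) (cellsN n.toNat)).getD r []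
      = (PySem.List.pyRange 0 n 1).map (fun c => (r, c)) := by
  have hNn : ((n.toNat : Nat) : Int) = n := Int.toNat_of_nonneg (by omega)
  rw [getD_bucketsFold]
  unfold cellsN
  rw [pv_filter_flatMap]
  have hg : ∀ i : Nat, i < n.toNat →
      ((List.range n.toNat).map (fun (j : Nat) => ((i : Int), (j : Int)))).filter (fun x => x.1 == r)
        = if r ≤ (i : Int) ∧ (i : Int) < r + 1 then
            (List.range n.toNat).map (fun (j : Nat) => ((i : Int), (j : Int))) else [] := by
    intro i hiN
    rw [List.filter_map]
    by_cases hir : ((i : Int)) = r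
    · have hp : ((fun (x : Int × Int) => x.1 == r) ∘ (fun (j : Nat) => ((i : Int), (j : Int))))
          = (fun (_ : Nat) => true) := funext fun j => by simp [Function.comp_def, hir]
      rw [hp, if_pos (by omega)]
      simp
    · have hp : ((fun (x : Int × Int) => x.1 == r) ∘ (fun (j : Nat) => ((i : Int), (j : Int))))
          = (fun (_ : Nat) => false) := funext fun j => by simp [Function.comp_def, hir]
      rw [hp, if_neg (by omega)]
      simp
  rw [flatMap_range_window n.toNat r (r + 1) _
    (fun i => (List.range n.toNat).map (fun (j : Nat) => ((i : Int), (j : Int)))) hr hg]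
  rw [show ((min (r + 1) ((n.toNat : Nat) : Int)) - r).toNat = 1 by omega]
  rw [show List.range 1 = [0] from rfl]
  simp only [List.map_cons, List.map_nil, List.flatten_cons, List.flatten_nil, List.append_nil,
    Nat.add_zero]
  rw [PySem.List.pyRange_one, List.map_map, show (n - 0 : Int).toNat = n.toNat from by omega]
  refine List.map_congr_left fun j _ => ?_
  simp only [Function.comp_apply, Prod.mk.injEq]
  constructor <;> omega

theorem seg_col (n c : Int) (hc : 0 ≤ c) (hcn : c < n) :
    (bucketsFold (fun x => x.2) (cellsN n.toNat)).getD c []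
      = (PySem.List.pyRange 0 n 1).map (fun r => (r, c)) := by
  have hNn : ((n.toNat : Nat) : Int) = n := Int.toNat_of_nonneg (by omega)
  rw [getD_bucket_closed n.toNat (fun x => x.2) c 0 ((n.toNat : Int)) (fun _ => c)
    le_rfl (by intro i j; dsimp only; omega) (by intro i hi; dsimp only; omega)]
  rw [PySem.List.pyRange_one, List.map_map]
  rw [show ((min ((n.toNat : Nat) : Int) ((n.toNat : Nat) : Int)) - 0).toNat = (n - 0).toNat by omega]
  refine List.map_congr_left fun j _ => ?_
  simp only [Function.comp_apply, Prod.mk.injEq]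
  exact ⟨by omega, trivial⟩

theorem seg_diag (n k : Int) (hk1 : -n < k) (hk2 : k < n) :
    (bucketsFold (fun x => x.1 - x.2) (cellsN n.toNat)).getD k []
      = collectLine (max k 0) (max (-k) 0) 1 1 n := by
  have hNn : ((n.toNat : Nat) : Int) = n := Int.toNat_of_nonneg (by omega)
  rw [getD_bucket_closed n.toNat (fun x => x.1 - x.2) k (max k 0) ((n.toNat : Int) + k)
    (fun i => i - k) (by omega) (by intro i j; dsimp only; omega)
    (by intro i hi; dsimp only; omega)]
  unfold collectLine
  rw [collectGo_diag n n.toNat (max k 0) (max (-k) 0) (by omega) (by omega) (by omega)]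
  rw [show (min (((n.toNat : Nat) : Int) + k) (((n.toNat : Nat) : Int)) - max k 0).toNat
      = (min (n - max k 0) (n - max (-k) 0)).toNat from by omega]
  refine List.map_congr_left fun j _ => ?_
  simp only [Prod.mk.injEq]
  constructor <;> omega

theorem seg_anti (n k : Int) (hk1 : 0 ≤ k) (hk2 : k < 2 * n - 1) :
    (bucketsFold (fun x => x.1 + x.2) (cellsN n.toNat)).getD k []
      = collectLine (max (k - n + 1) 0) (min k (n - 1)) 1 (-1) n := by
  have hNn : ((n.toNat : Nat) : Int) = n := Int.toNat_of_nonneg (by omega)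
  rw [getD_bucket_closed n.toNat (fun x => x.1 + x.2) k (max (k - n + 1) 0) (k + 1)
    (fun i => k - i) (by omega) (by intro i j; dsimp only; omega)
    (by intro i hi; dsimp only; omega)]
  unfold collectLine
  rw [collectGo_anti n n.toNat (max (k - n + 1) 0) (min k (n - 1)) (by omega) (by omega) (by omega)]
  rw [show ((min (k + 1) ((n.toNat : Nat) : Int)) - max (k - n + 1) 0).toNat
      = (min (n - max (k - n + 1) 0) (min k (n - 1) + 1)).toNat by omega]
  refine List.map_congr_left fun j _ => ?_
  simp only [Prod.mk.injEq]
  constructor <;> omega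

-- ===== VERDICT =====
theorem all_lines_py_spec : Claim_equal_all_lines_py := by
  intro n _
  unfold Spec_all_lines_py all_lines_py
  simp only [all_lines_py_alt, buildB_eq]
  by_cases hn : n ≤ 0
  · rw [PySem.List.pyRange_one_eq_nil hn, PySem.List.pyRange_one_eq_nil (by omega : n ≤ (1 : Int)),
      PySem.List.pyRange_one_eq_nil (by omega : 2 * n - 1 ≤ (0 : Int))]
    simp
  · replace hn : 0 < n := by omega
    congr 1
    rw [PySem.List.pyRange_one_append 0 n (2 * n - 1) (by omega) (by omega), List.map_append]
    have h1 : (PySem.List.pyRange 0 n 1).map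
        (fun r => (bucketsFold (fun x => x.1) (cellsN n.toNat)).getD r [])
        = (PySem.List.pyRange 0 n 1).map
            (fun r => (PySem.List.pyRange 0 n 1).map (fun c => (r, c))) := by
      refine List.map_congr_left fun r hr => ?_
      rw [PySem.List.mem_pyRange_one] at hr
      exact seg_row n r hr.1 hr.2
    have h2 : (PySem.List.pyRange 0 n 1).map
        (fun c => (bucketsFold (fun x => x.2) (cellsN n.toNat)).getD c [])
        = (PySem.List.pyRange 0 n 1).map
            (fun c => (PySem.List.pyRange 0 n 1).map (fun r => (r, c))) := by
      refine List.map_congr_left fun c hc => ?_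
      rw [PySem.List.mem_pyRange_one] at hc
      exact seg_col n c hc.1 hc.2
    have h3 : (PySem.List.pyRange 0 n 1).map
        (fun c0 => (bucketsFold (fun x => x.1 - x.2) (cellsN n.toNat)).getD (-c0) [])
        = (PySem.List.pyRange 0 n 1).map (fun c0 => collectLine 0 c0 1 1 n) := by
      refine List.map_congr_left fun c0 hc0 => ?_
      rw [PySem.List.mem_pyRange_one] at hc0
      rw [seg_diag n (-c0) (by omega) (by omega),
        show max (-c0) 0 = 0 from by omega, show max (-(-c0)) 0 = c0 from by omega]
    have h4 : (PySem.List.pyRange 1 n 1).map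
        (fun r0 => (bucketsFold (fun x => x.1 - x.2) (cellsN n.toNat)).getD r0 [])
        = (PySem.List.pyRange 1 n 1).map (fun r0 => collectLine r0 0 1 1 n) := by
      refine List.map_congr_left fun r0 hr0 => ?_
      rw [PySem.List.mem_pyRange_one] at hr0
      rw [seg_diag n r0 (by omega) (by omega),
        show max r0 0 = r0 from by omega, show max (-r0) 0 = 0 from by omega]
    have h5 : (PySem.List.pyRange 0 n 1).map
        (fun k => (bucketsFold (fun x => x.1 + x.2) (cellsN n.toNat)).getD k [])
        = (PySem.List.pyRange 0 n 1).map (fun c0 => collectLine 0 c0 1 (-1) n) := by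
      refine List.map_congr_left fun c0 hc0 => ?_
      rw [PySem.List.mem_pyRange_one] at hc0
      rw [seg_anti n c0 (by omega) (by omega),
        show max (c0 - n + 1) 0 = 0 from by omega, show min c0 (n - 1) = c0 from by omega]
    have h6 : (PySem.List.pyRange n (2 * n - 1) 1).map
        (fun k => (bucketsFold (fun x => x.1 + x.2) (cellsN n.toNat)).getD k [])
        = (PySem.List.pyRange 1 n 1).map (fun r0 => collectLine r0 (n - 1) 1 (-1) n) := by
      rw [PySem.List.pyRange_one, PySem.List.pyRange_one, List.map_map, List.map_map,
        show (2 * n - 1 - n).toNat = (n - 1).toNat from by omega]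
      refine List.map_congr_left fun t ht => ?_
      rw [List.mem_range] at ht
      simp only [Function.comp_apply]
      rw [seg_anti n (n + (t : Int)) (by omega) (by omega),
        show max (n + (t : Int) - n + 1) 0 = 1 + (t : Int) from by omega,
        show min (n + (t : Int)) (n - 1) = n - 1 from by omega]
    rw [h1, h2, h3, h4, h5, h6]
    simp only [List.append_assoc]
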